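-- pv_equiv track=rewrite | github.com/Stenardt-9002/CODECHEF-Datastructure-and-algo | Gfg_list/POTD/2023/February/(16-02-2023)_Good_stones.py | goodStones
-- ===== SOURCE A (Python) =====
-- def goodStones(n, arr) -> int:
--     #code here
--     visited = [-1]*n
--     def dfs_u(src):
--         if src>=n or src<0:
--             return 1
--         if visited[src]!=-1:
--             return visited[src]
--         visited[src] = 0
--         visited[src] = dfs_u(src+arr[src])
--         return visited[src]
--     for i in range(n):
--         if visited[i]==-1:
--             visited[i] = dfs_u(i)
--     return sum(visited)
-- ===== SOURCE B (Python) =====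
-- def goodStones(n, arr) -> int:
--     # Bounded simulation: stone i is good iff following j -> j + arr[j]
--     # leaves [0, n) within n steps (a longer in-bounds walk must repeat a
--     # state, hence cycles forever).  No recursion, no memo table.
--     cnt = 0
--     for i in range(n):
--         j = i
--         for _ in range(n):
--             if 0 <= j < n:
--                 j += arr[j]
--         if not (0 <= j < n):
--             cnt += 1
--     return cnt
-- ===== Notes on version B (the rewrite author's own statement) =====
-- stated objective: simpler
-- what changed: Replaces the recursive DFS with a shared memoisation array (cycle-marking via in-progress 0 entries) by a plain per-stone bounded simulation: follow j -> j + arr[j] for n guarded steps; the stone is good iff it has left [0,n), since an in-bounds walk of length n must repeat a state and therefore cycles forever.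
import Mathlib
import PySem

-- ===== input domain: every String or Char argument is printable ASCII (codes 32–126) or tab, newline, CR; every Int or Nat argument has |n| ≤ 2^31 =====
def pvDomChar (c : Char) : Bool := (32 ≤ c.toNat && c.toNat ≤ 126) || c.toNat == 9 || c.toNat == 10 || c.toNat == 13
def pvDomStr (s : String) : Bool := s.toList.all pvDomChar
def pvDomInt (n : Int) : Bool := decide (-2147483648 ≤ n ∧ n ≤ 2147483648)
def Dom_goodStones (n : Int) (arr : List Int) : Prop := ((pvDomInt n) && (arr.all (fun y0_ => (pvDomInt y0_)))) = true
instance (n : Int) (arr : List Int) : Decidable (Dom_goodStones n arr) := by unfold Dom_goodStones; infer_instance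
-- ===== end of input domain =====

-- B replaces A's recursive memoised DFS by a per-stone bounded simulation (no recursion, no
-- shared table); it is not faster, just plainer.  A mutates only a local list, so return-value
-- equivalence is full equivalence.

-- ===== PORT A =====
-- termination helper for the port's recursion (cited in decreasing_by): writing 0 over a -1 entry
-- strictly decreases the number of -1 entries.
theorem pvCountSetLt (l : List Int) (k : Nat) (h : l[k]? = some (-1)) :
    (l.set k 0).count (-1) < l.count (-1) := by
  induction l generalizing k with
  | nil => simp at h
  | cons a t ih =>
    cases k with
    | zero =>
      simp at h
      subst h
      simp [List.count_cons]
    | succ k =>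
      simp at h
      simpa [List.count_cons] using ih k h

-- dfs_u: `visited` is threaded as state (Python mutates the closed-over list).
def dfsA (n : Int) (arr : List Int) (visited : List Int) (src : Int) : Int × List Int :=
  if h : src ≥ n ∨ src < 0 then (1, visited)
  else
    match hv : PySem.List.pyGet? visited src with
    | none => (0, visited)  -- Python raises IndexError here; unreachable under Pre_goodStones
    | some v0 =>
      if v0 ≠ -1 then (v0, visited)
      else
        -- visited[src] = 0; then visited[src] = dfs_u(src + arr[src])
        let res := dfsA n arr (visited.set src.toNat 0) (src + (PySem.List.pyGet? arr src).getD 0)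
        (res.1, res.2.set src.toNat res.1)
termination_by visited.count (-1)
decreasing_by
  apply pvCountSetLt
  rw [PySem.List.pyGet?_of_nonneg visited (by omega : (0:Int) ≤ src)] at hv
  simp_all

def goodStones (n : Int) (arr : List Int) : Int :=
  let visited := List.replicate n.toNat (-1)
  let final := (PySem.List.pyRange 0 n 1).foldl (fun visited i =>
    if (PySem.List.pyGet? visited i).getD (-1) = -1 then
      let res := dfsA n arr visited i
      res.2.set i.toNat res.1
    else visited) visited
  final.sum

-- ===== PORT B =====
-- one guarded step of the simulation: `if 0 <= j < n: j += arr[j]`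
def gstep (n : Int) (arr : List Int) (j : Int) : Int :=
  if 0 ≤ j ∧ j < n then j + (PySem.List.pyGet? arr j).getD 0 else j

def goodStones_alt (n : Int) (arr : List Int) : Int :=
  (PySem.List.pyRange 0 n 1).foldl (fun cnt i =>
    let j := (PySem.List.pyRange 0 n 1).foldl (fun j _ => gstep n arr j) i
    if ¬ (0 ≤ j ∧ j < n) then cnt + 1 else cnt) 0

-- ===== PRECONDITION & SPEC =====
-- Pre_ excludes exactly the inputs where A raises IndexError: when n exceeds len(arr) the DFS
-- reads arr[len(arr)] (B raises there too).
def Pre_goodStones (n : Int) (arr : List Int) : Prop := n ≤ (arr.length : Int)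
instance (n : Int) (arr : List Int) : Decidable (Pre_goodStones n arr) := by
  unfold Pre_goodStones; infer_instance

def pvWitness_goodStones : Int × List Int := (3, [1, -1, 5])

def Spec_goodStones (n : Int) (arr : List Int) (out : Int) : Prop := out = goodStones_alt n arr
instance (n : Int) (arr : List Int) (out : Int) : Decidable (Spec_goodStones n arr out) := by
  unfold Spec_goodStones; infer_instance

-- ===== CLAIM (what is proved, stated in full; the proofs are below) =====
def Claim_equal_goodStones : Prop := ∀ (n : Int) (arr : List Int),
  Dom_goodStones n arr → Pre_goodStones n arr → Spec_goodStones n arr (goodStones n arr)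

-- ===== LEMMAS AND PROOFS =====

-- escape = some iterate of the guarded step leaves [0, n)
def escP (n : Int) (arr : List Int) (j : Int) : Prop :=
  ∃ k : Nat, ¬ (0 ≤ (gstep n arr)^[k] j ∧ (gstep n arr)^[k] j < n)

def reachP (n : Int) (arr : List Int) (P : Int → Prop) (j : Int) : Prop :=
  ∃ k : Nat, P ((gstep n arr)^[k] j)

-- entry j of the memo list is unset or truthful
def cleanAt (n : Int) (arr : List Int) (v : List Int) (j : Int) : Prop :=
  v[j.toNat]? = some (-1) ∨ (v[j.toNat]? = some 1 ∧ escP n arr j) ∨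
  (v[j.toNat]? = some 0 ∧ ¬ escP n arr j)

theorem gstep_out (n : Int) (arr : List Int) (j : Int) (h : ¬ (0 ≤ j ∧ j < n)) :
    gstep n arr j = j := by simp [gstep, h]

theorem iterate_out_mono (n : Int) (arr : List Int) (j : Int) (k m : Nat) (hkm : k ≤ m)
    (h : ¬ (0 ≤ (gstep n arr)^[k] j ∧ (gstep n arr)^[k] j < n)) :
    ¬ (0 ≤ (gstep n arr)^[m] j ∧ (gstep n arr)^[m] j < n) := by
  obtain ⟨d, rfl⟩ : ∃ d, m = d + k := ⟨m - k, by omega⟩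
  rw [Function.iterate_add_apply, Function.iterate_fixed (gstep_out n arr _ h)]
  exact h

theorem esc_transfer (n : Int) (arr : List Int) (j x : Int) (k : Nat)
    (hx : (gstep n arr)^[k] j = x) (h : escP n arr j) : escP n arr x := by
  obtain ⟨m, hm⟩ := h
  by_cases hmk : k ≤ m
  · refine ⟨m - k, ?_⟩
    rw [← hx, ← Function.iterate_add_apply]
    have he : m - k + k = m := by omega
    rw [he]; exact hm
  · have h2 := iterate_out_mono n arr j m k (by omega) hm
    rw [hx] at h2
    exact ⟨0, h2⟩

theorem esc_of_next (n : Int) (arr : List Int) (j : Int)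
    (h : escP n arr (gstep n arr j)) : escP n arr j := by
  obtain ⟨k, hk⟩ := h
  exact ⟨k + 1, by rw [Function.iterate_succ_apply]; exact hk⟩

theorem esc_next_of (n : Int) (arr : List Int) (j : Int)
    (h : escP n arr j) : escP n arr (gstep n arr j) :=
  esc_transfer n arr j _ 1 (by simp) h

theorem not_esc_of_next (n : Int) (arr : List Int) (j : Int)
    (h : ¬ escP n arr (gstep n arr j)) : ¬ escP n arr j :=
  fun he => h (esc_next_of n arr j he)

theorem esc_out (n : Int) (arr : List Int) (j : Int) (h : ¬ (0 ≤ j ∧ j < n)) :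
    escP n arr j := ⟨0, h⟩

theorem iterate_mod_of_fix {α : Type} (f : α → α) (x : α) (p : Nat) (hp : 0 < p)
    (hfix : f^[p] x = x) : ∀ m, f^[m] x = f^[m % p] x := by
  intro m
  induction m using Nat.strong_induction_on with
  | _ m IH =>
    by_cases hmp : m < p
    · rw [Nat.mod_eq_of_lt hmp]
    · have h1 : m = (m - p) + p := by omega
      have h2 : (m - p) % p = m % p := by
        conv_rhs => rw [h1]
        rw [Nat.add_mod_right]
      have e : f^[m] x = f^[m - p] x := by
        conv_lhs => rw [h1]
        rw [Function.iterate_add_apply, hfix]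
      rw [e, IH (m - p) (by omega), h2]

theorem cycle_not_esc (n : Int) (arr : List Int) (j : Int) (p : Nat) (hp : 0 < p)
    (hin : 0 ≤ j ∧ j < n) (hfix : (gstep n arr)^[p] j = j) : ¬ escP n arr j := by
  rintro ⟨m, hm⟩
  have h1 : (gstep n arr)^[p * m] j = j := by
    rw [Function.iterate_mul]
    exact Function.iterate_fixed hfix m
  have h2 := iterate_out_mono n arr j m (p * m) (Nat.le_mul_of_pos_left m hp) hm
  rw [h1] at h2
  exact h2 hin

-- pigeonhole: escape happens within n steps or never
theorem esc_iff_iterN (n : Int) (arr : List Int) (j : Int) :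
    escP n arr j ↔ ¬ (0 ≤ (gstep n arr)^[n.toNat] j ∧ (gstep n arr)^[n.toNat] j < n) := by
  constructor
  · intro h hN
    have hall : ∀ m, m ≤ n.toNat → 0 ≤ (gstep n arr)^[m] j ∧ (gstep n arr)^[m] j < n := by
      intro m hm
      by_contra hout
      exact (iterate_out_mono n arr j m n.toNat hm hout) hN
    have key : ∀ (a b : Nat), a < b → b ≤ n.toNat →
        (gstep n arr)^[a] j = (gstep n arr)^[b] j → False := by
      intro a b hab hbN heqv
      have hfix : (gstep n arr)^[b - a] ((gstep n arr)^[a] j) = (gstep n arr)^[a] j := by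
        rw [← Function.iterate_add_apply]
        have hba : b - a + a = b := by omega
        rw [hba]
        exact heqv.symm
      obtain ⟨m, hm⟩ := h
      by_cases hmN : m ≤ n.toNat
      · exact hm (hall m hmN)
      · have e1 : (gstep n arr)^[m] j = (gstep n arr)^[(m - a) % (b - a) + a] j := by
          have hma : m = (m - a) + a := by omega
          rw [hma, Function.iterate_add_apply,
            iterate_mod_of_fix _ _ (b - a) (by omega) hfix (m - a),
            ← Function.iterate_add_apply, Nat.add_sub_cancel]
        have hlt : (m - a) % (b - a) + a ≤ n.toNat := by
          have := Nat.mod_lt (m - a) (y := b - a) (by omega)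
          omega
        rw [e1] at hm
        exact hm (hall _ hlt)
    have hcard : (Finset.range n.toNat).card < (Finset.range (n.toNat + 1)).card := by simp
    have hmaps : Set.MapsTo (fun m => ((gstep n arr)^[m] j).toNat)
        ↑(Finset.range (n.toNat + 1)) ↑(Finset.range n.toNat) := by
      intro m hm
      simp only [Finset.coe_range, Set.mem_Iio] at hm ⊢
      have := hall m (by omega)
      omega
    obtain ⟨a, ha, b, hb, hab, heq⟩ := Finset.exists_ne_map_eq_of_card_lt_of_maps_to hcard hmaps
    simp only [Finset.mem_range] at ha hb
    have ha' := hall a (by omega)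
    have hb' := hall b (by omega)
    have heqv : (gstep n arr)^[a] j = (gstep n arr)^[b] j := by omega
    rcases Nat.lt_or_ge a b with hlt | hge
    · exact key a b hlt (by omega) heqv
    · exact key b a (by omega) (by omega) heqv.symm
  · intro h
    exact ⟨n.toNat, h⟩

theorem cleanAt_weaken (n : Int) (arr : List Int) (v : List Int) (j : Int) (r : Int)
    (P : Int → Prop) (h : cleanAt n arr v j) :
    v[j.toNat]? = some (-1) ∨ (v[j.toNat]? = some 1 ∧ escP n arr j) ∨
    (v[j.toNat]? = some 0 ∧ (¬ escP n arr j ∨ (r = 0 ∧ reachP n arr P j))) := by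
  rcases h with a | b | c
  · exact Or.inl a
  · exact Or.inr (Or.inl b)
  · exact Or.inr (Or.inr ⟨c.1, Or.inl c.2⟩)

-- the big one: full functional specification of A's memoised DFS
theorem dfsA_spec (n : Int) (arr : List Int) (v : List Int) (src : Int) :
    ∀ (P : Int → Prop),
    v.length = n.toNat →
    (∀ j, P j → 0 ≤ j ∧ j < n ∧ v[j.toNat]? = some 0) →
    (∀ j : Int, 0 ≤ j → j < n → ¬ P j → cleanAt n arr v j) →
    ((dfsA n arr v src).1 = 0 ∨ (dfsA n arr v src).1 = 1) ∧
    (dfsA n arr v src).2.length = n.toNat ∧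
    (∀ j, P j → (dfsA n arr v src).2[j.toNat]? = some 0) ∧
    ((dfsA n arr v src).1 = 1 → ¬ (0 ≤ src ∧ src < n) ∨ escP n arr src) ∧
    ((dfsA n arr v src).1 = 0 → ¬ escP n arr src ∨ reachP n arr P src) ∧
    (∀ j : Int, 0 ≤ j → j < n → ¬ P j →
      (dfsA n arr v src).2[j.toNat]? = some (-1) ∨
      ((dfsA n arr v src).2[j.toNat]? = some 1 ∧ escP n arr j) ∨
      ((dfsA n arr v src).2[j.toNat]? = some 0 ∧
        (¬ escP n arr j ∨ ((dfsA n arr v src).1 = 0 ∧ reachP n arr P j)))) ∧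
    (∀ k : Nat, (dfsA n arr v src).2[k]? = v[k]? ∨ (dfsA n arr v src).2[k]? = some 0 ∨
      (dfsA n arr v src).2[k]? = some 1) := by
  induction v, src using dfsA.induct n arr with
  | case1 visited src h =>
    intro P hlen hP hclean
    have hred : dfsA n arr visited src = (1, visited) := by
      rw [dfsA, dif_pos h]
    rw [hred]
    dsimp only
    refine ⟨Or.inr rfl, hlen, ?_, ?_, ?_, ?_, fun k => Or.inl rfl⟩
    · intro j hPj; exact (hP j hPj).2.2
    · intro _; exact Or.inl (by omega)
    · intro h0; exact absurd h0 (by norm_num)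
    · intro j hj0 hjn hPj
      exact cleanAt_weaken n arr visited j 1 P (hclean j hj0 hjn hPj)
  | case2 visited src h hv =>
    intro P hlen hP hclean
    exfalso
    rw [PySem.List.pyGet?_of_nonneg visited (by omega : (0:Int) ≤ src)] at hv
    simp only [List.getElem?_eq_none_iff] at hv
    omega
  | case3 visited src h v0 hv hne =>
    intro P hlen hP hclean
    have hred : dfsA n arr visited src = (v0, visited) := by
      rw [dfsA, dif_neg h]
      split
      next heq => rw [heq] at hv; simp at hv
      next v0' heq =>
        rw [heq] at hv
        obtain rfl : v0' = v0 := Option.some.inj hv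
        rw [if_pos hne]
    rw [hred]
    dsimp only
    have hsrc : 0 ≤ src ∧ src < n := ⟨by omega, by omega⟩
    have hv' : visited[src.toNat]? = some v0 := by
      rw [← PySem.List.pyGet?_of_nonneg visited (by omega : (0:Int) ≤ src)]
      exact hv
    by_cases hPs : P src
    · have h0 := (hP src hPs).2.2
      have hv0 : v0 = 0 := by
        rw [hv'] at h0; exact Option.some.inj h0
      subst hv0
      refine ⟨Or.inl rfl, hlen, fun j hPj => (hP j hPj).2.2, ?_, ?_, ?_,
        fun k => Or.inl rfl⟩
      · intro h1; exact absurd h1 (by norm_num)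
      · intro _; right; exact ⟨0, by simpa using hPs⟩
      · intro j hj0 hjn hPj
        exact cleanAt_weaken n arr visited j 0 P (hclean j hj0 hjn hPj)
    · have hcl := hclean src hsrc.1 hsrc.2 hPs
      unfold cleanAt at hcl
      rw [hv'] at hcl
      rcases hcl with h1 | h2 | h3
      · exact absurd (Option.some.inj h1) hne
      · have hv0 : v0 = 1 := Option.some.inj h2.1
        subst hv0
        refine ⟨Or.inr rfl, hlen, fun j hPj => (hP j hPj).2.2, fun _ => Or.inr h2.2,
          ?_, ?_, fun k => Or.inl rfl⟩
        · intro h0; exact absurd h0 (by norm_num)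
        · intro j hj0 hjn hPj
          exact cleanAt_weaken n arr visited j 1 P (hclean j hj0 hjn hPj)
      · have hv0 : v0 = 0 := Option.some.inj h3.1
        subst hv0
        refine ⟨Or.inl rfl, hlen, fun j hPj => (hP j hPj).2.2, ?_,
          fun _ => Or.inl h3.2, ?_, fun k => Or.inl rfl⟩
        · intro h1; exact absurd h1 (by norm_num)
        · intro j hj0 hjn hPj
          exact cleanAt_weaken n arr visited j 0 P (hclean j hj0 hjn hPj)
  | case4 visited src h v0 hv hne IH =>
    intro P hlen hP hclean
    simp only [ne_eq, not_not] at hne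
    subst hne
    have hsrc : 0 ≤ src ∧ src < n := ⟨by omega, by omega⟩
    have hv' : visited[src.toNat]? = some (-1) := by
      rw [← PySem.List.pyGet?_of_nonneg visited (by omega : (0:Int) ≤ src)]
      exact hv
    have hsrcNat : src.toNat < visited.length := by
      rw [hlen]; omega
    have hnext : src + (PySem.List.pyGet? arr src).getD 0 = gstep n arr src := by
      simp [gstep, hsrc.1, hsrc.2]
    have hred : dfsA n arr visited src =
        ((dfsA n arr (visited.set src.toNat 0) (gstep n arr src)).1,
         (dfsA n arr (visited.set src.toNat 0) (gstep n arr src)).2.set src.toNat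
           (dfsA n arr (visited.set src.toNat 0) (gstep n arr src)).1) := by
      rw [dfsA, dif_neg h]
      split
      next heq => rw [heq] at hv; simp at hv
      next v0' heq =>
        rw [heq] at hv
        obtain rfl : v0' = -1 := Option.some.inj hv
        rw [if_neg (fun hc => hc rfl)]
        rw [hnext]
    have hPns : ∀ j, P j → j ≠ src := by
      intro j hPj he
      have h3 := (hP j hPj).2.2
      rw [he, hv'] at h3
      simp at h3
    have hlen1 : (visited.set src.toNat 0).length = n.toNat := by
      simp [hlen]
    have hP1 : ∀ j, (P j ∨ j = src) → 0 ≤ j ∧ j < n ∧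
        (visited.set src.toNat 0)[j.toNat]? = some 0 := by
      intro j hj
      rcases hj with hj | rfl
      · have h3 := hP j hj
        have hjs := hPns j hj
        refine ⟨h3.1, h3.2.1, ?_⟩
        rw [List.getElem?_set_ne (by omega : src.toNat ≠ j.toNat)]
        exact h3.2.2
      · exact ⟨hsrc.1, hsrc.2, List.getElem?_set_self hsrcNat⟩
    have hclean1 : ∀ j : Int, 0 ≤ j → j < n → ¬ (P j ∨ j = src) →
        cleanAt n arr (visited.set src.toNat 0) j := by
      intro j h0 hn hj
      have hjP : ¬ P j := fun x => hj (Or.inl x)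
      have hjs : j ≠ src := fun x => hj (Or.inr x)
      have hc := hclean j h0 hn hjP
      unfold cleanAt at hc ⊢
      rw [List.getElem?_set_ne (by omega : src.toNat ≠ j.toNat)]
      exact hc
    obtain ⟨ihr, ihlen, ihP, ih1, ih0, ihf, ihg⟩ := IH (fun j => P j ∨ j = src) hlen1 hP1 hclean1
    rw [hnext] at ihr ihlen ihP ih1 ih0 ihf ihg
    rw [hred]
    dsimp only
    set r := (dfsA n arr (visited.set src.toNat 0) (gstep n arr src)).1 with hrdef
    set w := (dfsA n arr (visited.set src.toNat 0) (gstep n arr src)).2 with hwdef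
    have hsrcw : src.toNat < w.length := by rw [ihlen]; omega
    have hsrc1 : r = 1 → escP n arr src := by
      intro h1
      rcases ih1 h1 with hout | hesc
      · exact esc_of_next n arr src (esc_out n arr _ hout)
      · exact esc_of_next n arr src hesc
    have hsrc0 : r = 0 → ¬ escP n arr src ∨ reachP n arr P src := by
      intro h0
      rcases ih0 h0 with hne' | hre
      · exact Or.inl (not_esc_of_next n arr src hne')
      · obtain ⟨k, hk⟩ := hre
        rcases hk with hPk | hks
        · exact Or.inr ⟨k + 1, by rw [Function.iterate_succ_apply]; exact hPk⟩
        · left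
          apply cycle_not_esc n arr src (k + 1) (by omega) hsrc
          rw [Function.iterate_succ_apply]; exact hks
    refine ⟨ihr, by simp [ihlen], ?_, ?_, ?_, ?_, ?_⟩
    · intro j hPj
      have hjs := hPns j hPj
      have hj0 := (hP j hPj).1
      rw [List.getElem?_set_ne (by omega : src.toNat ≠ j.toNat)]
      exact ihP j (Or.inl hPj)
    · intro h1; exact Or.inr (hsrc1 h1)
    · exact hsrc0
    · intro j h0 hn hPj
      by_cases hjs : j = src
      · subst hjs
        rw [List.getElem?_set_self hsrcw]
        rcases ihr with h0r | h1r
        · right; right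
          refine ⟨by rw [h0r], ?_⟩
          rcases hsrc0 h0r with a | b
          · exact Or.inl a
          · exact Or.inr ⟨h0r, b⟩
        · right; left
          exact ⟨by rw [h1r], hsrc1 h1r⟩
      · rw [List.getElem?_set_ne (by omega : src.toNat ≠ j.toNat)]
        have hnP1 : ¬ (P j ∨ j = src) := by
          rintro (hx | hx)
          · exact hPj hx
          · exact hjs hx
        rcases ihf j h0 hn hnP1 with hf1 | hf2 | hf3
        · exact Or.inl hf1
        · exact Or.inr (Or.inl hf2)
        · right; right
          refine ⟨hf3.1, ?_⟩
          rcases hf3.2 with hnesc | ⟨hr0, hreach⟩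
          · exact Or.inl hnesc
          · obtain ⟨k, hk⟩ := hreach
            rcases hk with hPk | hks
            · exact Or.inr ⟨hr0, ⟨k, hPk⟩⟩
            · rcases hsrc0 hr0 with hnes | hrs
              · left
                intro hej
                exact hnes (esc_transfer n arr j src k hks hej)
              · obtain ⟨k', hk'⟩ := hrs
                refine Or.inr ⟨hr0, ⟨k' + k, ?_⟩⟩
                rw [Function.iterate_add_apply, hks]
                exact hk'
    · intro k
      by_cases hks : k = src.toNat
      · subst hks
        rw [List.getElem?_set_self hsrcw]
        rcases ihr with hh | hh
        · right; left; rw [hh]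
        · right; right; rw [hh]
      · rw [List.getElem?_set_ne (by omega : src.toNat ≠ k)]
        rcases ihg k with hk1 | hk2 | hk3
        · left
          rw [hk1, List.getElem?_set_ne (by omega : src.toNat ≠ k)]
        · exact Or.inr (Or.inl hk2)
        · exact Or.inr (Or.inr hk3)

-- the loop body of A's port, named for the invariant proof (definitionally equal to the lambda)
def loopF (n : Int) (arr : List Int) (visited : List Int) (i : Int) : List Int :=
  if (PySem.List.pyGet? visited i).getD (-1) = -1 then
    let res := dfsA n arr visited i
    res.2.set i.toNat res.1
  else visited

theorem foldl_const_iterate {α β : Type} (g : β → β) :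
    ∀ (l : List α) (x : β), l.foldl (fun j _ => g j) x = g^[l.length] x := by
  intro l
  induction l with
  | nil => intro x; simp
  | cons a t ih => intro x; simp [ih, Function.iterate_succ_apply]

theorem foldl_count_eq_sum_map (p : Nat → Prop) [DecidablePred p] :
    ∀ (l : List Nat) (c : Int), l.foldl (fun c k => if p k then c + 1 else c) c
      = c + (l.map (fun k => if p k then (1 : Int) else 0)).sum := by
  intro l
  induction l with
  | nil => intro c; simp
  | cons a t ih =>
    intro c
    by_cases hp : p a <;> simp [hp, ih] <;> ring

-- invariant of A's main loop: the memo list stays truthful, processed entries are decided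
theorem loop_inv (n : Int) (arr : List Int) :
    ∀ t : Nat, t ≤ n.toNat →
    ((PySem.List.pyRange 0 (t : Int) 1).foldl (loopF n arr)
        (List.replicate n.toNat (-1))).length = n.toNat ∧
    (∀ j : Int, 0 ≤ j → j < n → cleanAt n arr
        ((PySem.List.pyRange 0 (t : Int) 1).foldl (loopF n arr) (List.replicate n.toNat (-1))) j) ∧
    (∀ i : Nat, i < t →
      (((PySem.List.pyRange 0 (t : Int) 1).foldl (loopF n arr)
          (List.replicate n.toNat (-1)))[i]? = some 1 ∧ escP n arr (i : Int)) ∨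
      (((PySem.List.pyRange 0 (t : Int) 1).foldl (loopF n arr)
          (List.replicate n.toNat (-1)))[i]? = some 0 ∧ ¬ escP n arr (i : Int))) := by
  intro t
  induction t with
  | zero =>
    intro _
    rw [show ((0 : Nat) : Int) = 0 from rfl, PySem.List.pyRange_one_eq_nil le_rfl]
    refine ⟨by simp, ?_, by omega⟩
    intro j h0 hn
    unfold cleanAt
    left
    simp only [List.foldl_nil, List.getElem?_replicate]
    rw [if_pos (by omega)]
  | succ t ih =>
    intro ht
    have ht' : t ≤ n.toNat := by omega
    have htn : (t : Int) < n := by omega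
    obtain ⟨Vlen, Vclean, Vdone⟩ := ih ht'
    have hcast : ((t + 1 : Nat) : Int) = (t : Int) + 1 := by push_cast; ring
    rw [hcast, PySem.List.pyRange_one_succ_right (by omega : (0 : Int) ≤ (t : Int)),
      List.foldl_append]
    set V := (PySem.List.pyRange 0 (t : Int) 1).foldl (loopF n arr)
      (List.replicate n.toNat (-1)) with hV
    simp only [List.foldl_cons, List.foldl_nil]
    have htNat : ((t : Int)).toNat = t := by simp
    have hcV := Vclean (t : Int) (by omega) htn
    unfold cleanAt at hcV
    rw [htNat] at hcV
    rcases hcV with hm1 | hdone1 | hdone0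
    · -- unvisited: the DFS runs
      have hguard : (PySem.List.pyGet? V (t : Int)).getD (-1) = -1 := by
        rw [PySem.List.pyGet?_natCast, hm1]; rfl
      have hred : loopF n arr V (t : Int) =
          (dfsA n arr V (t : Int)).2.set t (dfsA n arr V (t : Int)).1 := by
        unfold loopF
        rw [if_pos hguard, htNat]
      rw [hred]
      obtain ⟨dr, dlen, _, d1, d0, df, dg⟩ := dfsA_spec n arr V (t : Int) (fun _ => False)
        Vlen (fun j hj => hj.elim) (fun j a b _ => Vclean j a b)
      set r := (dfsA n arr V (t : Int)).1 with hrd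
      set w := (dfsA n arr V (t : Int)).2 with hwd
      have hr1 : r = 1 → escP n arr (t : Int) := by
        intro h1
        rcases d1 h1 with hout | he
        · exact absurd ⟨by omega, htn⟩ hout
        · exact he
      have hr0 : r = 0 → ¬ escP n arr (t : Int) := by
        intro h0
        rcases d0 h0 with a | ⟨k, hk⟩
        · exact a
        · exact hk.elim
      have hwt : t < w.length := by rw [dlen]; omega
      have hclean' : ∀ j : Int, 0 ≤ j → j < n → cleanAt n arr (w.set t r) j := by
        intro j h0j hjn
        by_cases hjt : j = (t : Int)
        · subst hjt
          unfold cleanAt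
          simp only [Int.toNat_natCast]
          rw [List.getElem?_set_self hwt]
          rcases dr with hh | hh
          · right; right; exact ⟨by rw [hh], hr0 hh⟩
          · right; left; exact ⟨by rw [hh], hr1 hh⟩
        · unfold cleanAt
          rw [List.getElem?_set_ne (by omega : t ≠ j.toNat)]
          rcases df j h0j hjn (fun f => f) with a | b | c
          · exact Or.inl a
          · exact Or.inr (Or.inl b)
          · refine Or.inr (Or.inr ⟨c.1, ?_⟩)
            rcases c.2 with hne' | ⟨_, ⟨k, hk⟩⟩
            · exact hne'
            · exact hk.elim
      refine ⟨by simp [dlen], hclean', ?_⟩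
      intro i hi
      by_cases hit : i = t
      · subst hit
        rcases dr with hh | hh
        · right
          exact ⟨by rw [List.getElem?_set_self hwt, hh], hr0 hh⟩
        · left
          exact ⟨by rw [List.getElem?_set_self hwt, hh], hr1 hh⟩
      · have hi' : i < t := by omega
        have hne' : w[i]? ≠ some (-1) := by
          rcases dg i with a | b | c
          · rw [a]
            rcases Vdone i hi' with ⟨e, _⟩ | ⟨e, _⟩ <;> rw [e] <;> simp
          · rw [b]; simp
          · rw [c]; simp
        have hc := hclean' (i : Int) (by omega) (by omega)
        unfold cleanAt at hc
        simp only [Int.toNat_natCast] at hc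
        rcases hc with a | b | c
        · rw [List.getElem?_set_ne (by omega : t ≠ i)] at a
          exact absurd a hne'
        · exact Or.inl b
        · exact Or.inr c
    · -- already decided 1
      have hguard : ¬ ((PySem.List.pyGet? V (t : Int)).getD (-1) = -1) := by
        rw [PySem.List.pyGet?_natCast, hdone1.1]
        simp
      have hred : loopF n arr V (t : Int) = V := by
        unfold loopF
        rw [if_neg hguard]
      rw [hred]
      refine ⟨Vlen, Vclean, ?_⟩
      intro i hi
      by_cases hit : i = t
      · subst hit; exact Or.inl hdone1
      · exact Vdone i (by omega)
    · -- already decided 0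
      have hguard : ¬ ((PySem.List.pyGet? V (t : Int)).getD (-1) = -1) := by
        rw [PySem.List.pyGet?_natCast, hdone0.1]
        simp
      have hred : loopF n arr V (t : Int) = V := by
        unfold loopF
        rw [if_neg hguard]
      rw [hred]
      refine ⟨Vlen, Vclean, ?_⟩
      intro i hi
      by_cases hit : i = t
      · subst hit; exact Or.inr hdone0
      · exact Vdone i (by omega)

-- ===== VERDICT (by name: the statement is the Claim_ definition above) =====
theorem goodStones_spec : Claim_equal_goodStones := by
  unfold Claim_equal_goodStones Spec_goodStones
  intro n arr _ _
  have hA : goodStones n arr = ((PySem.List.pyRange 0 n 1).foldl (loopF n arr)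
      (List.replicate n.toNat (-1))).sum := rfl
  have hNn : PySem.List.pyRange 0 n 1 = PySem.List.pyRange 0 (n.toNat : Int) 1 := by
    by_cases h0 : 0 ≤ n
    · rw [Int.toNat_of_nonneg h0]
    · rw [PySem.List.pyRange_one_eq_nil (by omega), PySem.List.pyRange_one_eq_nil (by omega)]
  have hB : goodStones_alt n arr = (PySem.List.pyRange 0 n 1).foldl
      (fun cnt i => if ¬ (0 ≤ (gstep n arr)^[n.toNat] i ∧ (gstep n arr)^[n.toNat] i < n)
        then cnt + 1 else cnt) 0 := by
    unfold goodStones_alt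
    congr 1
    funext cnt i
    rw [foldl_const_iterate (gstep n arr) (PySem.List.pyRange 0 n 1) i,
      PySem.List.length_pyRange_one]
    norm_num
  obtain ⟨Vlen, Vclean, Vdone⟩ := loop_inv n arr n.toNat le_rfl
  rw [hA, hNn]
  set V := (PySem.List.pyRange 0 (n.toNat : Int) 1).foldl (loopF n arr)
    (List.replicate n.toNat (-1)) with hVdef
  have hVeq : V = (List.range n.toNat).map
      (fun (k : Nat) => if ¬ (0 ≤ (gstep n arr)^[n.toNat] (k : Int) ∧
        (gstep n arr)^[n.toNat] (k : Int) < n) then (1 : Int) else 0) := by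
    apply List.ext_getElem?
    intro i
    by_cases hi : i < n.toNat
    · rw [List.getElem?_map, List.getElem?_range hi]
      simp only [Option.map_some]
      rcases Vdone i hi with ⟨e, he⟩ | ⟨e, he⟩
      · rw [e, if_pos ((esc_iff_iterN n arr (i : Int)).mp he)]
      · rw [e, if_neg (fun hc => he ((esc_iff_iterN n arr (i : Int)).mpr hc))]
    · rw [List.getElem?_eq_none (by rw [Vlen]; omega),
        List.getElem?_eq_none (by simp; omega)]
  rw [hVeq, hB, hNn, PySem.List.pyRange_one]
  simp only [zero_add, Int.sub_zero, Int.toNat_natCast]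
  rw [List.foldl_map]
  rw [foldl_count_eq_sum_map
    (fun k => ¬ (0 ≤ (gstep n arr)^[n.toNat] (k : Int) ∧ (gstep n arr)^[n.toNat] (k : Int) < n))
    (List.range n.toNat) 0]
  rw [zero_add]
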